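-- pv_equiv track=rewrite | github.com/endomorphosis/ipfs_kit_py | test_scripts/check_ipfs_tools.py | check_tool_categories
-- ===== SOURCE A (Python) =====
-- def check_tool_categories(tools_list):
--     """Check and categorize tools by prefix"""
--     categories = {}
--
--     for tool in tools_list:
--         prefix = tool.split("_")[0] if "_" in tool else "other"
--         if prefix not in categories:
--             categories[prefix] = []
--         categories[prefix].append(tool)
--
--     return categories
-- ===== SOURCE B (Python) =====
-- def check_tool_categories(tools_list):
--     """Check and categorize tools by prefix"""
--     def key(t):
--         return t.split("_")[0] if "_" in t else "other"
--
--     prefixes = []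
--     for t in tools_list:
--         k = key(t)
--         if k not in prefixes:
--             prefixes.append(k)
--
--     return {p: [t for t in tools_list if key(t) == p] for p in prefixes}
-- ===== Notes on version B (the rewrite author's own statement) =====
-- stated objective: alternative
-- what changed: B replaces A's incremental dict-of-growing-lists (one pass, per-element membership test and in-place append) by a two-phase construction: first collect the distinct prefixes in first-appearance order, then build each group in one shot as a filter of the whole list.
import Mathlib
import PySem

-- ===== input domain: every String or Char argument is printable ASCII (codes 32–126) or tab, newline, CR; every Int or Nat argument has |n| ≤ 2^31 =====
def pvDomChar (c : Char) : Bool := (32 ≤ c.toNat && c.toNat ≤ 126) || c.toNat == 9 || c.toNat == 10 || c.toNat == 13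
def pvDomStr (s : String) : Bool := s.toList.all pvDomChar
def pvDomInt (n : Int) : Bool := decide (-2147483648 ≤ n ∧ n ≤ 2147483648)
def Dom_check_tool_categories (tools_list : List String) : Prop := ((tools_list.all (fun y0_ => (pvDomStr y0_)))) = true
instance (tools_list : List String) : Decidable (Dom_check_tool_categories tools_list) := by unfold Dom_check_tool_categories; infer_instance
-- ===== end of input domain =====

-- B builds the result in two phases (distinct prefixes in first-appearance order, then one
-- filter of the whole list per prefix) instead of A's incremental dict of growing lists.

-- shared key expression: tool.split("_")[0] if "_" in tool else "other"
-- (split "_" never returns an empty list, so the [0] indexing never raises; .getD covers the none case)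
def pyPrefix (t : String) : String :=
  if PySem.Str.isIn "_" t then
    (PySem.List.pyGet? ((PySem.Str.split? t "_").getD []) 0).getD ""
  else "other"

-- ===== PORT A =====
def check_tool_categories (tools_list : List String) : List (String × List String) :=
  let categories := tools_list.foldl (fun d tool =>
    let pfx := pyPrefix tool
    let d := if d.contains pfx then d else d.insert pfx ([] : List String)
    d.modify pfx [] (fun l => l ++ [tool])) PySem.Dict.empty
  categories.items

-- ===== PORT B =====
def check_tool_categories_alt (tools_list : List String) : List (String × List String) :=
  let prefixes := tools_list.foldl (fun s t => PySem.Set.add s (pyPrefix t)) PySem.Set.empty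
  prefixes.map (fun p => (p, tools_list.filter (fun t => pyPrefix t == p)))

-- ===== PRECONDITION & SPEC =====
def Spec_check_tool_categories (tools_list : List String) (out : List (String × List String)) : Prop := out = check_tool_categories_alt tools_list
instance (tools_list : List String) (out : List (String × List String)) : Decidable (Spec_check_tool_categories tools_list out) := by unfold Spec_check_tool_categories; infer_instance

-- ===== CLAIM (what is proved, stated in full; the proofs are below) =====
def Claim_equal_check_tool_categories : Prop := ∀ (tools_list : List String), Dom_check_tool_categories tools_list → Spec_check_tool_categories tools_list (check_tool_categories tools_list)

-- ===== LEMMAS AND PROOFS =====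

-- A's "ensure key, then append" step is the same dict as a bare modify with default []
theorem step_eq_modify (d : PySem.Dict String (List String)) (k : String) (t : String) :
    (if d.contains k then d else d.insert k ([] : List String)).modify k [] (fun l => l ++ [t])
      = d.modify k [] (fun l => l ++ [t]) := by
  by_cases h : d.contains k = true
  · rw [if_pos h]
  · rw [if_neg h]
    simp only [PySem.Dict.modify, PySem.Dict.getD_insert_self, PySem.Dict.insert_insert_self,
      PySem.Dict.getD_of_not_contains d ([] : List String) (by simpa using h)]

theorem check_tool_categories_spec : Claim_equal_check_tool_categories := by
  intro tools _
  unfold Spec_check_tool_categories check_tool_categories check_tool_categories_alt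
  -- A's loop is a plain modify-loop
  have hfold : tools.foldl (fun d tool =>
      (if d.contains (pyPrefix tool) then d else d.insert (pyPrefix tool) ([] : List String)).modify
        (pyPrefix tool) [] (fun l => l ++ [tool])) PySem.Dict.empty
      = tools.foldl (fun d t => d.modify (pyPrefix t) [] (fun l => l ++ [t])) PySem.Dict.empty := by
    congr 1
    funext d t
    exact step_eq_modify d (pyPrefix t) t
  rw [hfold]
  set d := tools.foldl (fun d t => d.modify (pyPrefix t) [] (fun l => l ++ [t])) PySem.Dict.empty with hd
  have hnd : d.keys.Nodup := by
    rw [hd]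
    exact PySem.Dict.nodup_keys_foldl_modify_key tools pyPrefix [] (fun _ t => fun l => l ++ [t]) _
      (by simp [PySem.Dict.keys_empty])
  have hkeys : d.keys = tools.foldl (fun s t => PySem.Set.add s (pyPrefix t)) PySem.Set.empty := by
    rw [hd, PySem.Dict.keys_foldl_modify_key]
    simp [PySem.Dict.keys_empty, PySem.Set.update, PySem.Set.empty, List.foldl_map]
  have hgetD : ∀ c, d.getD c [] = tools.filter (fun t => pyPrefix t == c) := by
    intro c
    have := PySem.Dict.getD_foldl_modify_append
      (l := tools.map (fun t => ((pyPrefix t : String), t)))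
      (d := (PySem.Dict.empty : PySem.Dict String (List String))) (c := c)
    rw [List.foldl_map] at this
    rw [hd]
    simp only [this, PySem.Dict.getD_empty, List.nil_append, List.filter_map, List.map_map]
    simp [Function.comp_def, List.map_id']
  rw [PySem.Dict.items_eq_map_keys d hnd ([] : List String), hkeys]
  exact List.map_congr_left (fun p _ => by rw [hgetD p])
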